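-- pv_equiv track=rewrite | github.com/PeggyKimotho/Python-Code-Challenge1 | challenge3.py | solve
-- ===== SOURCE A (Python) =====
-- def solve(s):
--     consonant_values = {'a': 0, 'b': 2, 'c': 3, 'd': 4, 'e': 0,
--                         'f': 6, 'g': 7, 'h': 8, 'i': 0, 'j': 10,
--                         'k': 11, 'l': 12, 'm': 13, 'n': 14, 'o': 0,
--                         'p': 16, 'q': 17, 'r': 18, 's': 19, 't': 20,
--                         'u': 0, 'v': 22, 'w': 23, 'x': 24, 'y': 25, 'z': 26}
--
--     def get_consonant_value(substring):
--         value = 0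
--         for char in substring:
--             value += consonant_values[char]
--         return value
--
--     max_value = 0
--     current_substring = ""
--
--     for char in s:
--         if char in consonant_values:
--             current_substring += char
--         else:
--             if current_substring:
--                 substring_value = get_consonant_value(current_substring)
--                 if substring_value > max_value:
--                     max_value = substring_value
--                 current_substring = ""
--
--     if current_substring:
--         substring_value = get_consonant_value(current_substring)
--         if substring_value > max_value:
--             max_value = substring_value
--
--     return max_value
-- ===== SOURCE B (Python) =====
-- def solve(s):
--     def value(ch):
--         return 0 if ch in 'aeiou' else ord(ch) - 96
--
--     spaced = "".join(ch if 'a' <= ch <= 'z' else ' ' for ch in s)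
--     return max((sum(value(ch) for ch in run) for run in spaced.split()), default=0)
-- ===== Notes on version B (the rewrite author's own statement) =====
-- stated objective: idiomatic
-- what changed: Replaces A's char-by-char run-building state machine (accumulating a current substring and re-scanning it with a dict-lookup helper) by a tokenize-then-map-reduce pipeline: map non-letters to spaces, split() into maximal letter runs, value each run by a closed-form letter formula, and take max(..., default=0).
import Mathlib
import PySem

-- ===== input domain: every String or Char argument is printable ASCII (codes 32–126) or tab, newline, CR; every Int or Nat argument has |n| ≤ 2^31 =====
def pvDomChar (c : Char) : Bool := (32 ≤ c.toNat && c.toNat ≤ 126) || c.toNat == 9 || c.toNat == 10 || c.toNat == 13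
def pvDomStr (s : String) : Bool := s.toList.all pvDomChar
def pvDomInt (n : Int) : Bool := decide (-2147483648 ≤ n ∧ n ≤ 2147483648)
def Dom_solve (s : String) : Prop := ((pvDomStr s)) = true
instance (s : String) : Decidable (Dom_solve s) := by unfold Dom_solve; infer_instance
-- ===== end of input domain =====

-- B replaces A's char-by-char run-building state machine (plus a helper re-scan of each run) by a
-- tokenize-then-map-reduce decomposition: map non-letters to spaces, split into words, take the max
-- word value (objective: idiomatic; same asymptotic cost).

-- ===== PORT A =====
def pvConsonantValues : PySem.Dict Char Int := PySem.Dict.ofList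
  [('a',0),('b',2),('c',3),('d',4),('e',0),('f',6),('g',7),('h',8),('i',0),('j',10),
   ('k',11),('l',12),('m',13),('n',14),('o',0),('p',16),('q',17),('r',18),('s',19),('t',20),
   ('u',0),('v',22),('w',23),('x',24),('y',25),('z',26)]

-- consonant_values[char]: getD 0 is exact here — the loop only ever feeds this helper chars that are dict keys
def pvGetConsonantValue (substring : List Char) : Int :=
  substring.foldl (fun value char => value + pvConsonantValues.getD char 0) 0

-- the body of A's 'for char in s' loop; state = (max_value, current_substring as its char list)
def pvSolveStep (st : Int × List Char) (char : Char) : Int × List Char :=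
  if pvConsonantValues.contains char then (st.1, st.2 ++ [char])
  else if st.2 ≠ [] then
    let substringValue := pvGetConsonantValue st.2
    (if substringValue > st.1 then substringValue else st.1, [])
  else st

def solve (s : String) : Int :=
  let st := s.toList.foldl pvSolveStep (0, [])
  if st.2 ≠ [] then
    let substringValue := pvGetConsonantValue st.2
    if substringValue > st.1 then substringValue else st.1
  else st.1

-- ===== PORT B =====
-- 0 if ch in 'aeiou' else ord(ch) - 96
def pvValue (ch : Char) : Int := if ch ∈ ['a','e','i','o','u'] then 0 else (ch.toNat : Int) - 96

-- the body of B's join comprehension: ch if 'a' <= ch <= 'z' else ' '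
def pvSpacedChar (ch : Char) : Char := if 'a' ≤ ch ∧ ch ≤ 'z' then ch else ' '

def solve_alt (s : String) : Int :=
  -- ''.join of the one-char pieces is the mapped char list as a string
  let spaced := String.ofList (s.toList.map pvSpacedChar)
  let sums := (PySem.Str.split₀ spaced).map (fun run => (run.toList.map pvValue).sum)
  (PySem.List.max? sums (fun x => x)).getD 0

-- ===== PRECONDITION & SPEC =====
def Spec_solve (s : String) (out : Int) : Prop := out = solve_alt s
instance (s : String) (out : Int) : Decidable (Spec_solve s out) := by unfold Spec_solve; infer_instance

-- ===== CLAIM (what is proved, stated in full; the proofs are below) =====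
def Claim_equal_solve : Prop := ∀ (s : String), Dom_solve s → Spec_solve s (solve s)

-- ===== LEMMAS AND PROOFS =====

def pvWsum (w : List Char) : Int := (w.map pvValue).sum
def pvMaxList (m : Int) (xs : List Int) : Int := xs.foldl max m

theorem pv_char_eq_iff_toNat (c d : Char) : (c = d) ↔ c.toNat = d.toNat := by
  constructor
  · intro h; rw [h]
  · intro h; exact Char.ext (UInt32.toNat_inj.mp h)

theorem pv_contains_eq (c : Char) :
    pvConsonantValues.contains c = decide ('a' ≤ c ∧ c ≤ 'z') := by
  simp [pvConsonantValues, PySem.Dict.contains, Char.le_def]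
  rw [show (PySem.Dict.ofList [('a',(0:Int)),('b',2),('c',3),('d',4),('e',0),('f',6),('g',7),('h',8),('i',0),('j',10),('k',11),('l',12),('m',13),('n',14),('o',0),('p',16),('q',17),('r',18),('s',19),('t',20),('u',0),('v',22),('w',23),('x',24),('y',25),('z',26)]).items = [('a',(0:Int)),('b',2),('c',3),('d',4),('e',0),('f',6),('g',7),('h',8),('i',0),('j',10),('k',11),('l',12),('m',13),('n',14),('o',0),('p',16),('q',17),('r',18),('s',19),('t',20),('u',0),('v',22),('w',23),('x',24),('y',25),('z',26)] from by decide]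
  apply Bool.eq_iff_iff.mpr
  simp only [List.any, Bool.or_eq_true, beq_iff_eq, pv_char_eq_iff_toNat, decide_eq_true_eq,
    Bool.and_eq_true, UInt32.le_iff_toNat_le]
  simp only [show ('a'.toNat)=97 from rfl, show ('b'.toNat)=98 from rfl, show ('c'.toNat)=99 from rfl,
    show ('d'.toNat)=100 from rfl, show ('e'.toNat)=101 from rfl, show ('f'.toNat)=102 from rfl,
    show ('g'.toNat)=103 from rfl, show ('h'.toNat)=104 from rfl, show ('i'.toNat)=105 from rfl,
    show ('j'.toNat)=106 from rfl, show ('k'.toNat)=107 from rfl, show ('l'.toNat)=108 from rfl,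
    show ('m'.toNat)=109 from rfl, show ('n'.toNat)=110 from rfl, show ('o'.toNat)=111 from rfl,
    show ('p'.toNat)=112 from rfl, show ('q'.toNat)=113 from rfl, show ('r'.toNat)=114 from rfl,
    show ('s'.toNat)=115 from rfl, show ('t'.toNat)=116 from rfl, show ('u'.toNat)=117 from rfl,
    show ('v'.toNat)=118 from rfl, show ('w'.toNat)=119 from rfl, show ('x'.toNat)=120 from rfl,
    show ('y'.toNat)=121 from rfl, show ('z'.toNat)=122 from rfl,
    show (UInt32.toNat 97)=97 from rfl, show (UInt32.toNat 122)=122 from rfl,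
    show (∀ d : Char, d.val.toNat = d.toNat) from fun _ => rfl, Bool.false_eq_true, or_false]
  omega

theorem pv_char_cases (c : Char) (h1 : 'a' ≤ c) (h2 : c ≤ 'z') :
    c ∈ ['a','b','c','d','e','f','g','h','i','j','k','l','m','n','o','p','q','r','s','t','u','v','w','x','y','z'] := by
  simp only [Char.le_def] at h1 h2
  have b1 : 97 ≤ c.toNat := UInt32.le_iff_toNat_le.mp h1
  have b2 : c.toNat ≤ 122 := UInt32.le_iff_toNat_le.mp h2
  have hc : c = Char.ofNat c.toNat := (Char.ofNat_toNat c).symm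
  interval_cases h : c.toNat <;> rw [hc] <;> decide

theorem pv_getD_eq (c : Char) (h1 : 'a' ≤ c) (h2 : c ≤ 'z') :
    pvConsonantValues.getD c 0 = pvValue c := by
  have := pv_char_cases c h1 h2
  fin_cases this <;> decide

theorem pv_value_nonneg (c : Char) (h1 : 'a' ≤ c) (h2 : c ≤ 'z') : 0 ≤ pvValue c := by
  have := pv_char_cases c h1 h2
  fin_cases this <;> decide

theorem pv_not_isspace (c : Char) (h1 : 'a' ≤ c) (h2 : c ≤ 'z') :
    PySem.Chars.isspace c = false := by
  simp only [Char.le_def] at h1 h2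
  have b1 : 97 ≤ c.toNat := UInt32.le_iff_toNat_le.mp h1
  have b2 : c.toNat ≤ 122 := UInt32.le_iff_toNat_le.mp h2
  simp [PySem.Chars.isspace]
  omega

theorem pv_gcv_eq (w : List Char) (h : ∀ c ∈ w, 'a' ≤ c ∧ c ≤ 'z') :
    pvGetConsonantValue w = pvWsum w := by
  unfold pvGetConsonantValue pvWsum
  rw [PySem.List.foldl_add]
  rw [List.map_congr_left (fun c hc => pv_getD_eq c (h c hc).1 (h c hc).2)]
  omega

theorem pv_go_acc (l : List Char) : ∀ (cur : List Char) (acc : List (List Char)),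
    PySem.Chars.split₀.go l cur acc = acc.reverse ++ PySem.Chars.split₀.go l cur [] := by
  induction l with
  | nil =>
    intro cur acc
    simp only [PySem.Chars.split₀.go]
    by_cases h : cur.isEmpty <;> simp [h]
  | cons c rest ih =>
    intro cur acc
    simp only [PySem.Chars.split₀.go]
    by_cases hs : PySem.Chars.isspace c
    · by_cases hc : cur.isEmpty
      · simp [hs, hc, ih [] acc]
      · simp only [hs, hc, if_true, if_false, Bool.false_eq_true]
        rw [ih [] (cur.reverse :: acc), ih [] [cur.reverse]]
        simp
    · simp only [hs, Bool.false_eq_true, if_false]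
      exact ih (c :: cur) acc

theorem pv_go_letters (l : List Char) : ∀ (cur : List Char) (accw : List (List Char)),
    (∀ c ∈ cur, 'a' ≤ c ∧ c ≤ 'z') →
    (∀ w ∈ accw, ∀ c ∈ w, 'a' ≤ c ∧ c ≤ 'z') →
    ∀ w ∈ PySem.Chars.split₀.go (l.map pvSpacedChar) cur accw, ∀ c ∈ w, 'a' ≤ c ∧ c ≤ 'z' := by
  induction l with
  | nil =>
    intro cur accw hcur haccw
    simp only [List.map_nil, PySem.Chars.split₀.go]
    by_cases h : cur.isEmpty
    · simp only [h, if_true]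
      intro w hw; exact haccw w (List.mem_reverse.mp hw)
    · simp only [h, Bool.false_eq_true, if_false]
      intro w hw
      rcases List.mem_cons.mp (List.mem_reverse.mp hw) with h1 | h1
      · intro c hc; rw [h1] at hc; exact hcur c (List.mem_reverse.mp hc)
      · exact haccw w h1
  | cons c rest ih =>
    intro cur accw hcur haccw
    simp only [List.map_cons, PySem.Chars.split₀.go]
    by_cases hl : 'a' ≤ c ∧ c ≤ 'z'
    · rw [show pvSpacedChar c = c from by simp [pvSpacedChar, hl]]
      rw [pv_not_isspace c hl.1 hl.2]
      simp only [Bool.false_eq_true, if_false]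
      exact ih (c :: cur) accw
        (by intro x hx
            rcases List.mem_cons.mp hx with h1 | h1
            · rw [h1]; exact hl
            · exact hcur x h1)
        haccw
    · rw [show pvSpacedChar c = ' ' from by simp [pvSpacedChar, hl]]
      rw [show PySem.Chars.isspace ' ' = true from by decide]
      simp only [if_true]
      by_cases h : cur.isEmpty
      · simp only [h, if_true]
        exact ih [] accw (by intro x hx; simp at hx) haccw
      · simp only [h, Bool.false_eq_true, if_false]
        exact ih [] (cur.reverse :: accw) (by intro x hx; simp at hx)
          (by intro w hw
              rcases List.mem_cons.mp hw with h1 | h1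
              · intro x hx; rw [h1] at hx; exact hcur x (List.mem_reverse.mp hx)
              · exact haccw w h1)

theorem pv_foldl_max_comm (t : List Int) : ∀ (a b : Int),
    t.foldl max (max a b) = max a (t.foldl max b) := by
  induction t with
  | nil => intro a b; rfl
  | cons x t ih => intro a b; simp only [List.foldl_cons, max_assoc, ih]

theorem pv_if_max (m v : Int) : (if v > m then v else m) = max m v := by
  rcases le_or_gt v m with h | h <;> simp [max_def] <;> omega

theorem pv_main (l : List Char) : ∀ (maxv : Int) (cur : List Char),
    (∀ c ∈ cur, 'a' ≤ c ∧ c ≤ 'z') →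
    (let st := l.foldl pvSolveStep (maxv, cur)
     if st.2 ≠ [] then
       let substringValue := pvGetConsonantValue st.2
       if substringValue > st.1 then substringValue else st.1
     else st.1)
    = pvMaxList maxv ((PySem.Chars.split₀.go (l.map pvSpacedChar) cur.reverse []).map pvWsum) := by
  induction l with
  | nil =>
    intro maxv cur hcur
    simp only [List.foldl_nil, List.map_nil, PySem.Chars.split₀.go]
    by_cases h : cur = []
    · subst h; simp [pvMaxList]
    · have hne : cur.reverse.isEmpty = false := by
        simp [h]
      simp only [hne, Bool.false_eq_true, if_false, List.reverse_reverse, ne_eq, h,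
        not_false_iff, if_true, List.reverse_nil]
      rw [pv_gcv_eq cur hcur, pv_if_max]
      simp [pvMaxList]
  | cons c rest ih =>
    intro maxv cur hcur
    simp only [List.foldl_cons, List.map_cons]
    by_cases hl : 'a' ≤ c ∧ c ≤ 'z'
    · rw [show pvSolveStep (maxv, cur) c = (maxv, cur ++ [c]) from by
        simp [pvSolveStep, pv_contains_eq, hl]]
      rw [show PySem.Chars.split₀.go (pvSpacedChar c :: List.map pvSpacedChar rest) cur.reverse []
            = PySem.Chars.split₀.go (List.map pvSpacedChar rest) (c :: cur.reverse) [] from by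
        rw [show pvSpacedChar c = c from by simp [pvSpacedChar, hl]]
        simp only [PySem.Chars.split₀.go, pv_not_isspace c hl.1 hl.2, Bool.false_eq_true, if_false]]
      rw [show (c :: cur.reverse) = (cur ++ [c]).reverse from by simp]
      exact ih maxv (cur ++ [c]) (by
        intro x hx
        rcases List.mem_append.mp hx with h1 | h1
        · exact hcur x h1
        · rw [List.mem_singleton.mp h1]; exact hl)
    · rw [show pvSpacedChar c = ' ' from by simp [pvSpacedChar, hl]]
      by_cases h : cur = []
      · subst h
        rw [show pvSolveStep (maxv, []) c = (maxv, []) from by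
          simp [pvSolveStep, pv_contains_eq, hl]]
        rw [show PySem.Chars.split₀.go (' ' :: List.map pvSpacedChar rest) List.nil.reverse []
              = PySem.Chars.split₀.go (List.map pvSpacedChar rest) [] [] from by
          simp only [List.reverse_nil, PySem.Chars.split₀.go,
            show PySem.Chars.isspace ' ' = true from by decide, if_true, List.isEmpty_nil]]
        exact ih maxv [] (by intro x hx; simp at hx)
      · rw [show pvSolveStep (maxv, cur) c
              = (max maxv (pvWsum cur), []) from by
          have hcf : pvConsonantValues.contains c = false := by
            rw [pv_contains_eq]; simp [hl]
          simp only [pvSolveStep, hcf, Bool.false_eq_true, if_false, ne_eq, h, not_false_iff,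
            if_true]
          rw [pv_gcv_eq cur hcur, pv_if_max]]
        rw [show PySem.Chars.split₀.go (' ' :: List.map pvSpacedChar rest) cur.reverse []
              = cur :: PySem.Chars.split₀.go (List.map pvSpacedChar rest) [] [] from by
          have hne : cur.reverse.isEmpty = false := by simp [h]
          simp only [PySem.Chars.split₀.go, show PySem.Chars.isspace ' ' = true from by decide,
            if_true, hne, Bool.false_eq_true, if_false, List.reverse_reverse]
          rw [pv_go_acc (List.map pvSpacedChar rest) [] [cur]]
          simp]
        simp only [List.map_cons]
        rw [show pvMaxList maxv (pvWsum cur :: ((PySem.Chars.split₀.go (List.map pvSpacedChar rest) [] []).map pvWsum))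
              = pvMaxList (max maxv (pvWsum cur)) ((PySem.Chars.split₀.go (List.map pvSpacedChar rest) [] []).map pvWsum) from rfl]
        have := ih (max maxv (pvWsum cur)) [] (by intro x hx; simp at hx)
        simpa using this

theorem pv_maxlist_eq (xs : List Int) (h : ∀ x ∈ xs, 0 ≤ x) :
    pvMaxList 0 xs = (PySem.List.max? xs (fun x => x)).getD 0 := by
  cases xs with
  | nil => simp [pvMaxList, PySem.List.max?]
  | cons x t =>
    rw [PySem.List.max?_id_cons]
    simp only [Option.getD_some]
    have hx : (0:Int) ≤ x := h x (by simp)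
    calc pvMaxList 0 (x :: t) = t.foldl max (max 0 x) := rfl
    _ = max 0 (t.foldl max x) := pv_foldl_max_comm t 0 x
    _ = t.foldl max x := max_eq_right (le_trans hx (PySem.List.le_foldl_max t x).1)

-- ===== VERDICT (by name: the statement is the Claim_ definition above) =====
theorem solve_spec : Claim_equal_solve := by
  intro s _
  show solve s = solve_alt s
  have h1 : solve s
      = pvMaxList 0 ((PySem.Chars.split₀.go (s.toList.map pvSpacedChar) [] []).map pvWsum) := by
    have := pv_main s.toList 0 [] (by intro x hx; simp at hx)
    simpa [solve] using this
  have h2 : solve_alt s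
      = (PySem.List.max? ((PySem.Chars.split₀.go (s.toList.map pvSpacedChar) [] []).map pvWsum)
          (fun x => x)).getD 0 := by
    simp [solve_alt, PySem.Str.split₀, PySem.Chars.split₀, List.map_map, Function.comp_def,
      String.toList_ofList]
    rfl
  have hlet := pv_go_letters s.toList [] [] (by intro x hx; simp at hx)
    (by intro w hw; simp at hw)
  have hnn : ∀ x ∈ (PySem.Chars.split₀.go (s.toList.map pvSpacedChar) [] []).map pvWsum, 0 ≤ x := by
    intro x hx
    rcases List.mem_map.mp hx with ⟨w, hw, rfl⟩
    apply List.sum_nonneg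
    intro y hy
    rcases List.mem_map.mp hy with ⟨c, hc, rfl⟩
    exact pv_value_nonneg c (hlet w hw c hc).1 (hlet w hw c hc).2
  rw [h1, h2, pv_maxlist_eq _ hnn]
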